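-- pv_equiv track=rewrite | github.com/aduerig/advent_of_code | 2015/19_dfs_ar.py | split_into_chemicals
-- ===== SOURCE A (Python) =====
-- def split_into_chemicals(string):
--     arr = []
--     i = 0
--     while i < len(string):
--         a = string[i]
--         if i != len(string) - 1 and string[i+1].islower():
--             a += string[i+1]
--             i += 1
--         arr.append(a)
--         i += 1
--     return tuple(arr)
-- ===== SOURCE B (Python) =====
-- def split_into_chemicals(string):
--     # Single forward pass with look-behind: a lowercase letter joins the
--     # previous token only if that token is still a single character.
--     tokens = []
--     for ch in string:
--         if ch.islower() and tokens and len(tokens[-1]) == 1: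
--             tokens[-1] += ch
--         else:
--             tokens.append(ch)
--     return tuple(tokens)
-- ===== Notes on version B (the rewrite author's own statement) =====
-- stated objective: idiomatic
-- what changed: Replaces the index-driven while loop with explicit lookahead (string[i+1]) by a single for-each pass with look-behind state: a lowercase char merges into the previous token iff that token is still a single character.
import Mathlib
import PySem

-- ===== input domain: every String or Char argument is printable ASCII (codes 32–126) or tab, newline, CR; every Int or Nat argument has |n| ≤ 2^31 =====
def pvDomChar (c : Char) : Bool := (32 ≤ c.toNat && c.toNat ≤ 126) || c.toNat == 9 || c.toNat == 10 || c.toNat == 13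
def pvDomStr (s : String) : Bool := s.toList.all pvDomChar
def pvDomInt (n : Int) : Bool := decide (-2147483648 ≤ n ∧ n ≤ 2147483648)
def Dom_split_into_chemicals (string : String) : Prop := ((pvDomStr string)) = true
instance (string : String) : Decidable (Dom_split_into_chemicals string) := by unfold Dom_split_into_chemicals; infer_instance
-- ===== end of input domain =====

-- B replaces A's indexed while loop with lookahead by a single for-each pass with
-- look-behind merging; same O(n) cost, no speed claim.

-- ===== PORT A =====
-- while i < len(string): a = string[i]; optional lowercase lookahead; append
def pvLoopA (cs : List Char) (i : Nat) (arr : List String) : List String :=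
  if i < cs.length then
    let a := String.ofList [cs.getD i ' ']
    if i ≠ cs.length - 1 ∧ PySem.Chars.islower (cs.getD (i+1) ' ') = true then
      pvLoopA cs (i + 2) (arr ++ [a ++ String.ofList [cs.getD (i+1) ' ']])
    else
      pvLoopA cs (i + 1) (arr ++ [a])
  else arr
termination_by cs.length - i

def split_into_chemicals (string : String) : List String :=
  pvLoopA string.toList 0 []

-- ===== PORT B =====
-- one step of B's for-loop: merge a lowercase char into a still-single-char last token
def pvStepB (tokens : List String) (ch : Char) : List String :=
  if PySem.Chars.islower ch = true ∧ (tokens.getLast?.map (fun t => t.toList.length == 1)).getD false = true then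
    tokens.dropLast ++ [(tokens.getLast?.getD "") ++ String.ofList [ch]]
  else
    tokens ++ [String.ofList [ch]]

def split_into_chemicals_alt (string : String) : List String :=
  string.toList.foldl pvStepB []

-- ===== PRECONDITION & SPEC =====
def Spec_split_into_chemicals (string : String) (out : List String) : Prop := out = split_into_chemicals_alt string
instance (string : String) (out : List String) : Decidable (Spec_split_into_chemicals string out) := by unfold Spec_split_into_chemicals; infer_instance

-- ===== CLAIM (what is proved, stated in full; the proofs are below) =====
def Claim_equal_split_into_chemicals : Prop := ∀ (string : String), Dom_split_into_chemicals string → Spec_split_into_chemicals string (split_into_chemicals string)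

-- ===== LEMMAS AND PROOFS =====

-- reference tokenisation: head char plus one optional following lowercase char
def pvTok : List Char → List String
  | [] => []
  | [c] => [String.ofList [c]]
  | c :: d :: rest =>
    if PySem.Chars.islower d = true then
      String.ofList [c, d] :: pvTok rest
    else
      String.ofList [c] :: pvTok (d :: rest)

lemma pvLoopA_eq_tok (cs : List Char) (i : Nat) (arr : List String) :
    pvLoopA cs i arr = arr ++ pvTok (cs.drop i) := by
  induction i, arr using pvLoopA.induct cs with
  | case1 i arr hlt a hcond ih =>
    have ha : a = String.ofList [cs.getD i ' '] := rfl
    obtain ⟨hne, hlow⟩ := hcond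
    have h1 : i + 1 < cs.length := by omega
    have hd1 : cs.getD (i+1) ' ' = cs[i+1] := List.getD_eq_getElem cs ' ' h1
    have hd0 : cs.getD i ' ' = cs[i] := List.getD_eq_getElem cs ' ' hlt
    rw [pvLoopA, if_pos hlt, if_pos ⟨hne, hlow⟩]
    simp only [] at ih ⊢
    rw [ih, List.drop_eq_getElem_cons hlt, List.drop_eq_getElem_cons h1, pvTok,
        if_pos (hd1 ▸ hlow)]
    simp only [ha, hd0, hd1, ← String.ofList_append]
    simp
  | case2 i arr hlt a hcond ih =>
    have ha : a = String.ofList [cs.getD i ' '] := rfl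
    have hd0 : cs.getD i ' ' = cs[i] := List.getD_eq_getElem cs ' ' hlt
    rw [pvLoopA, if_pos hlt, if_neg hcond]
    simp only [] at ih ⊢
    rw [ih, List.drop_eq_getElem_cons hlt]
    rcases hdrop : cs.drop (i+1) with _ | ⟨d, rest⟩
    · have hlen : i = cs.length - 1 := by
        have := congrArg List.length hdrop
        simp at this
        omega
      simp [pvTok, ha, List.getElem?_eq_getElem hlt]
    · have h1 : i + 1 < cs.length := by
        have := congrArg List.length hdrop
        simp at this
        omega
      have hne : i ≠ cs.length - 1 := by omega
      have hdchar : d = cs[i+1] := by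
        have h2 := List.drop_eq_getElem_cons (l := cs) h1
        rw [hdrop] at h2
        exact (List.cons.injEq _ _ _ _ ▸ h2).1
      have hnl : ¬ PySem.Chars.islower d = true := by
        intro hl
        exact hcond ⟨hne, by rw [List.getD_eq_getElem cs ' ' h1, ← hdchar]; exact hl⟩
      simp only [pvTok]
      rw [if_neg hnl]
      simp [ha, List.getElem?_eq_getElem hlt]
  | case3 i arr hge =>
    rw [pvLoopA]
    simp only [hge, if_false]
    rw [List.drop_of_length_le (by omega)]
    simp [pvTok]

lemma pvStepB_append (acc : List String) (c : Char)
    (h : PySem.Chars.islower c = true → ∀ t, acc.getLast? = some t → t.toList.length ≠ 1) :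
    pvStepB acc c = acc ++ [String.ofList [c]] := by
  unfold pvStepB
  rw [if_neg]
  rintro ⟨h1, h2⟩
  cases hl : acc.getLast? with
  | none => rw [hl] at h2; simp at h2
  | some t =>
    rw [hl] at h2
    simp at h2
    exact h h1 t hl h2

lemma pvFoldB_eq_tok (cs : List Char) (acc : List String)
    (h : ∀ c cs', cs = c :: cs' → PySem.Chars.islower c = true →
          ∀ t, acc.getLast? = some t → t.toList.length ≠ 1) :
    cs.foldl pvStepB acc = acc ++ pvTok cs := by
  induction cs using pvTok.induct generalizing acc with
  | case1 => simp [pvTok]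
  | case2 c =>
    simp only [List.foldl_cons, List.foldl_nil]
    rw [pvStepB_append acc c (fun hl t ht => h c [] rfl hl t ht)]
    simp [pvTok]
  | case3 c d rest hlow ih =>
    simp only [List.foldl_cons]
    rw [pvStepB_append acc c (fun hl t ht => h c (d :: rest) rfl hl t ht)]
    have hstep : pvStepB (acc ++ [String.ofList [c]]) d
        = acc ++ [String.ofList [c, d]] := by
      unfold pvStepB
      rw [if_pos ⟨hlow, by simp⟩]
      simp [← String.ofList_append]
    rw [hstep, ih]
    · rw [pvTok, if_pos hlow]
      simp
    · intro c' cs' _ _ t ht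
      simp at ht
      subst ht
      simp
  | case4 c d rest hnl ih =>
    simp only [List.foldl_cons]
    rw [pvStepB_append acc c (fun hl t ht => h c (d :: rest) rfl hl t ht)]
    have := ih (acc := acc ++ [String.ofList [c]]) ?_
    · rw [List.foldl_cons] at this
      rw [this]
      rw [pvTok, if_neg hnl]
      simp
    · intro c' cs' heq hl t ht
      injection heq with h1 _
      subst h1
      exact absurd hl hnl

-- ===== VERDICT (by name: the statement is the Claim_ definition above) =====
theorem split_into_chemicals_spec : Claim_equal_split_into_chemicals := by
  intro s _
  unfold Spec_split_into_chemicals split_into_chemicals split_into_chemicals_alt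
  rw [pvLoopA_eq_tok, pvFoldB_eq_tok]
  · simp
  · intro c cs' _ _ t ht; simp at ht
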